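-- pv_equiv track=rewrite | github.com/dailysound/Programmers_Python | Python3/Level2/더 맵게.py | solution
-- ===== SOURCE A (Python) =====
-- import heapq
--
-- def solution(scoville, K):
--     cnt = 0 # 더한 횟수
--
--     scoville.sort()
--
--     while scoville[0] <= K: # 정렬 후 맨 앞이 기준 숫자보다 높으면 다 기준점을 넘기기 때문
--         if len(scoville) == 1:
--             return -1
--         min_sum = heapq.heappop(scoville)
--         min_sum += (heapq.heappop(scoville))*2
--         heapq.heappush(scoville, min_sum)
--         cnt += 1 # 섞은 횟수 올리기
--
--     return cnt
-- ===== SOURCE B (Python) =====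
-- def solution(scoville, K):
--     xs = scoville
--     cnt = 0
--     while min(xs) <= K:
--         if len(xs) == 1:
--             return -1
--         a = min(xs)
--         xs.remove(a)
--         b = min(xs)
--         xs.remove(b)
--         xs.append(a + 2 * b)
--         cnt += 1
--     return cnt
-- ===== Notes on version B (the rewrite author's own statement) =====
-- stated objective: simpler
-- what changed: Replaces the initial sort plus heapq heap operations with a plain list processed by repeated min()+remove() scans: each round takes the two smallest by linear scan and appends their combination, no heap structure or sorting at all.
import Mathlib
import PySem

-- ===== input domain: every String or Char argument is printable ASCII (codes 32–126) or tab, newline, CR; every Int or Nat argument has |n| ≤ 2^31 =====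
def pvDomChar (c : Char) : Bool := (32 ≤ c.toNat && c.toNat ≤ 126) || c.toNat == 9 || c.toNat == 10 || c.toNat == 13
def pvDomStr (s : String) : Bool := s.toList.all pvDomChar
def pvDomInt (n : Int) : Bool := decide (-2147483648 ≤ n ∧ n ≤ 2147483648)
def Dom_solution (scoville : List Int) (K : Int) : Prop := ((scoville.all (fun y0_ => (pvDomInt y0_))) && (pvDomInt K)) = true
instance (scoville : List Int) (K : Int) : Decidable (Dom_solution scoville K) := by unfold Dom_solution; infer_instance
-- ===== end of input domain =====

-- B replaces A's sort + heapq operations by plain min()+remove() scans over the list;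
-- both A and B mutate the argument list in Python (A leaves a heap, B leaves its scratch list):
-- the equivalence proved here is about the RETURN value only.

-- ===== PORT A =====
-- CPython heapq._siftdown(heap, startpos, pos) loop (hand port, exact step for step;
-- reads/writes are at indices < len by construction, so List.getD/List.set are exact here)
def sdGo (heap : List Int) (startpos pos : Nat) (newitem : Int) : List Int :=
  if _h : startpos < pos then
    let parentpos := (pos - 1) / 2
    let parent := heap.getD parentpos 0
    if newitem < parent then
      sdGo (heap.set pos parent) startpos parentpos newitem
    else heap.set pos newitem
  else heap.set pos newitem
termination_by pos
decreasing_by omega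

-- heapq._siftdown(heap, startpos, pos): newitem = heap[pos], then the loop above
def siftdown (heap : List Int) (startpos pos : Nat) : List Int :=
  sdGo heap startpos pos (heap.getD pos 0)

-- CPython heapq._siftup(heap, pos) loop: move the hole down to a leaf, then _siftdown back up
def suGo (heap : List Int) (startpos pos : Nat) (newitem : Int) : List Int :=
  let endpos := heap.length
  let childpos := 2 * pos + 1
  if _h : childpos < endpos then
    let rightpos := childpos + 1
    let childpos2 :=
      if rightpos < endpos ∧ ¬ (heap.getD childpos 0 < heap.getD rightpos 0) then rightpos
      else childpos
    suGo (heap.set pos (heap.getD childpos2 0)) startpos childpos2 newitem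
  else
    siftdown (heap.set pos newitem) startpos pos
termination_by heap.length - pos
decreasing_by simp only [List.length_set]; split <;> omega

-- heapq._siftup(heap, pos): startpos = pos, newitem = heap[pos]
def siftup (heap : List Int) (pos : Nat) : List Int :=
  suGo heap pos pos (heap.getD pos 0)

-- heapq.heappush(heap, item): heap.append(item); _siftdown(heap, 0, len(heap)-1)
def heappush (heap : List Int) (item : Int) : List Int :=
  let h := heap ++ [item]
  siftdown h 0 (h.length - 1)

-- heapq.heappop(heap): lastelt = heap.pop(); if heap: swap in lastelt at 0 and _siftup
def heappop (heap : List Int) : Int × List Int :=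
  match PySem.List.pop? heap (-1) with
  | none => (0, [])  -- IndexError on an empty heap: unreachable under Pre_solution
  | some (lastelt, rest) =>
    if rest = [] then (lastelt, [])
    else
      let returnitem := rest.getD 0 0
      (returnitem, siftup (rest.set 0 lastelt) 0)

-- the while loop of A; fuel = current length bounds the iteration count (length drops by 1 each turn)
def aLoop : Nat → List Int → Int → Int → Int
  | 0, _, _, cnt => cnt
  | fuel + 1, heap, K, cnt =>
    match PySem.List.pyGet? heap 0 with
    | none => 0  -- scoville[0] IndexError on the empty list: unreachable under Pre_solution
    | some h0 =>
      if h0 ≤ K then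
        if heap.length = 1 then -1
        else
          let p1 := heappop heap
          let p2 := heappop p1.2
          let heap3 := heappush p2.2 (p1.1 + 2 * p2.1)
          aLoop fuel heap3 K (cnt + 1)
      else cnt

def solution (scoville : List Int) (K : Int) : Int :=
  aLoop (PySem.List.sorted scoville (fun x => x) false).length
    (PySem.List.sorted scoville (fun x => x) false) K 0

-- ===== PORT B =====
-- the while loop of B: linear min()-scans and first-occurrence remove(); same fuel bound
def bLoop : Nat → List Int → Int → Int → Int
  | 0, _, _, cnt => cnt
  | fuel + 1, xs, K, cnt =>
    match PySem.List.min? xs (fun y => y) with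
    | none => 0  -- min() ValueError on the empty list: unreachable under Pre_solution
    | some m =>
      if m ≤ K then
        if xs.length = 1 then -1
        else
          let a := (PySem.List.min? xs (fun y => y)).getD 0       -- a = min(xs)
          let xs1 := (PySem.List.remove? xs a).getD []            -- xs.remove(a)
          let b := (PySem.List.min? xs1 (fun y => y)).getD 0      -- b = min(xs)
          let xs2 := (PySem.List.remove? xs1 b).getD []           -- xs.remove(b)
          bLoop fuel (xs2 ++ [a + 2 * b]) K (cnt + 1)
      else cnt

def solution_alt (scoville : List Int) (K : Int) : Int :=
  bLoop scoville.length scoville K 0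

-- ===== PRECONDITION & SPEC =====
-- Pre_ excludes only the empty list, on which Python A raises IndexError (scoville[0]).
def Pre_solution (scoville : List Int) (K : Int) : Prop := scoville ≠ []
instance (scoville : List Int) (K : Int) : Decidable (Pre_solution scoville K) := by unfold Pre_solution; infer_instance
def pvWitness_solution : List Int × Int := ([1, 2, 3, 9, 10, 12], 7)

def Spec_solution (scoville : List Int) (K : Int) (out : Int) : Prop := out = solution_alt scoville K
instance (scoville : List Int) (K : Int) (out : Int) : Decidable (Spec_solution scoville K out) := by unfold Spec_solution; infer_instance

-- ===== CLAIM (what is proved, stated in full; the proofs are below) =====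
def Claim_equal_solution : Prop := ∀ (scoville : List Int) (K : Int), Dom_solution scoville K → Pre_solution scoville K → Spec_solution scoville K (solution scoville K)

-- ===== LEMMAS AND PROOFS =====

-- the binary-heap invariant of heapq: every non-root element dominates its parent
def IsHeap (l : List Int) : Prop :=
  ∀ i : Nat, 1 ≤ i → i < l.length → l.getD ((i - 1) / 2) 0 ≤ l.getD i 0

-- getD/set/append bookkeeping
theorem getD_set_self (l : List Int) (i : Nat) (v : Int) (h : i < l.length) :
    (l.set i v).getD i 0 = v := by
  rw [List.getD_eq_getElem _ _ (by simpa using h)]; simp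

theorem getD_set_ne (l : List Int) (i j : Nat) (v : Int) (h : i ≠ j) :
    (l.set j v).getD i 0 = l.getD i 0 := by
  simp only [List.getD_eq_getElem?_getD]
  rw [List.getElem?_set_ne (id (Ne.symm h))]

theorem set_getD_self (l : List Int) (i : Nat) (h : i < l.length) :
    l.set i (l.getD i 0) = l := by
  rw [List.getD_eq_getElem _ _ h, List.set_getElem_self]

theorem getD_append_lt (l : List Int) (x : Int) (i : Nat) (h : i < l.length) :
    (l ++ [x]).getD i 0 = l.getD i 0 := by
  simp only [List.getD_eq_getElem?_getD]
  rw [List.getElem?_append_left h]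

theorem getD_append_self (l : List Int) (x : Int) :
    (l ++ [x]).getD l.length 0 = x := by
  simp only [List.getD_eq_getElem?_getD]
  simp

theorem getD_dropLast (l : List Int) (i : Nat) (h : i + 1 < l.length) :
    l.dropLast.getD i 0 = l.getD i 0 := by
  simp only [List.getD_eq_getElem?_getD]
  rw [List.getElem?_eq_getElem (l := l.dropLast) (by simp; omega),
    List.getElem?_eq_getElem (by omega : i < l.length)]
  simp [List.getElem_dropLast]

-- multiset swap lemmas for List.set
theorem perm_getD_cons_set (t : List Int) (m : Nat) (v : Int) (hm : m < t.length) :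
    (t.getD m 0 :: t.set m v).Perm (v :: t) := by
  induction t generalizing m with
  | nil => simp at hm
  | cons y s ih =>
    cases m with
    | zero => simpa using List.Perm.swap v y s
    | succ k =>
      have hk : k < s.length := by simpa using hm
      have h1 : (s.getD k 0 :: s.set k v).Perm (v :: s) := ih k hk
      have e1 : ((y :: s).getD (k + 1) 0 :: (y :: s).set (k + 1) v)
          = s.getD k 0 :: y :: s.set k v := by simp [List.getD]
      rw [e1]
      exact ((List.Perm.swap _ _ _).trans (List.Perm.cons y h1)).trans (List.Perm.swap _ _ _)

theorem perm_cons_set_swap (t : List Int) (n : Nat) (x v : Int) (hn : n < t.length) :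
    (v :: t.set n x).Perm (x :: t.set n v) := by
  induction t generalizing n with
  | nil => simp at hn
  | cons y s ih =>
    cases n with
    | zero => simpa using List.Perm.swap x v s
    | succ k =>
      have hk : k < s.length := by simpa using hn
      show (v :: y :: s.set k x).Perm (x :: y :: s.set k v)
      exact ((List.Perm.swap _ _ _).trans (List.Perm.cons y (ih k hk))).trans (List.Perm.swap _ _ _)

theorem perm_double_set (l : List Int) (i j : Nat) (v : Int)
    (hij : i ≠ j) (hi : i < l.length) (hj : j < l.length) :
    ((l.set i (l.getD j 0)).set j v).Perm (l.set i v) := by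
  induction l generalizing i j with
  | nil => simp at hi
  | cons y s ih =>
    cases i with
    | zero =>
      cases j with
      | zero => omega
      | succ m =>
        have hm : m < s.length := by simpa using hj
        show ((s.getD m 0 :: s).set (m + 1) v).Perm (v :: s)
        have e1 : ((s.getD m 0 :: s).set (m + 1) v) = s.getD m 0 :: s.set m v := by simp
        rw [e1]; exact perm_getD_cons_set s m v hm
    | succ n =>
      cases j with
      | zero =>
        have hn : n < s.length := by simpa using hi
        show (v :: s.set n y).Perm (y :: s.set n v)
        exact perm_cons_set_swap s n y v hn
      | succ m =>
        have := ih n m (by omega) (by simpa using hi) (by simpa using hj)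
        show (y :: (s.set n (s.getD m 0)).set m v).Perm (y :: s.set n v)
        exact List.Perm.cons y this

-- _siftdown (percolate up): length, multiset and heap-property facts
theorem sdGo_length (heap : List Int) (s pos : Nat) (ni : Int) :
    (sdGo heap s pos ni).length = heap.length := by
  fun_induction sdGo <;> simp_all

theorem sdGo_perm : ∀ (pos : Nat) (heap : List Int) (s : Nat) (ni : Int), pos < heap.length →
    (sdGo heap s pos ni).Perm (heap.set pos ni) := by
  intro pos
  induction pos using Nat.strong_induction_on with
  | _ pos ih =>
    intro heap s ni h
    rw [sdGo]
    show ((if _h : s < pos then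
        if ni < heap.getD ((pos - 1) / 2) 0 then
          sdGo (heap.set pos (heap.getD ((pos - 1) / 2) 0)) s ((pos - 1) / 2) ni
        else heap.set pos ni
      else heap.set pos ni)).Perm (heap.set pos ni)
    split
    · split
      · have hlt : (pos - 1) / 2 < pos := by omega
        have := ih ((pos - 1) / 2) hlt (heap.set pos (heap.getD ((pos - 1) / 2) 0)) s ni
          (by simp; omega)
        exact this.trans (perm_double_set heap pos ((pos - 1) / 2) ni (by omega) h (by omega))
      · exact List.Perm.refl _
    · exact List.Perm.refl _

theorem sdGo_isHeap : ∀ (pos : Nat) (heap : List Int) (ni : Int), pos < heap.length →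
    (∀ i, 1 ≤ i → i < heap.length → i ≠ pos → heap.getD ((i - 1) / 2) 0 ≤ heap.getD i 0) →
    (∀ j, 1 ≤ j → j < heap.length → (j - 1) / 2 = pos → j ≠ pos →
      ni ≤ heap.getD j 0 ∧ (1 ≤ pos → heap.getD ((pos - 1) / 2) 0 ≤ heap.getD j 0)) →
    IsHeap (sdGo heap 0 pos ni) := by
  intro pos
  induction pos using Nat.strong_induction_on with
  | _ pos ih =>
    intro heap ni hpos ha hb
    rw [sdGo]
    show IsHeap (if _h : 0 < pos then
        if ni < heap.getD ((pos - 1) / 2) 0 then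
          sdGo (heap.set pos (heap.getD ((pos - 1) / 2) 0)) 0 ((pos - 1) / 2) ni
        else heap.set pos ni
      else heap.set pos ni)
    split
    · next h0 =>
      split
      · next hlt =>
        apply ih ((pos - 1) / 2) (by omega) _ ni (by simp; omega)
        · -- the parent-edge hypothesis for the shifted state
          intro i h1 h2 h3
          simp only [List.length_set] at h2
          by_cases hipos : i = pos
          · rw [hipos, getD_set_self heap pos _ hpos,
              getD_set_ne heap ((pos - 1) / 2) pos _ (by omega)]
          · by_cases hpar : (i - 1) / 2 = pos
            · rw [getD_set_ne heap i pos _ hipos, hpar, getD_set_self heap pos _ hpos]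
              exact (hb i h1 h2 hpar hipos).2 (by omega)
            · rw [getD_set_ne heap i pos _ hipos, getD_set_ne heap ((i - 1) / 2) pos _ hpar]
              exact ha i h1 h2 hipos
        · -- the child hypothesis for the shifted state
          intro j h1 h2 hparj hjne
          simp only [List.length_set] at h2
          by_cases hj : j = pos
          · constructor
            · rw [hj, getD_set_self heap pos _ hpos]; exact le_of_lt hlt
            · intro hpp1
              rw [hj, getD_set_self heap pos _ hpos,
                getD_set_ne heap (((pos - 1) / 2 - 1) / 2) pos _ (by omega)]
              exact ha ((pos - 1) / 2) hpp1 (by omega) (by omega)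
          · have hedge : heap.getD ((pos - 1) / 2) 0 ≤ heap.getD j 0 := by
              have := ha j h1 h2 hj
              rwa [hparj] at this
            constructor
            · rw [getD_set_ne heap j pos _ hj]
              exact le_trans (le_of_lt hlt) hedge
            · intro hpp1
              rw [getD_set_ne heap j pos _ hj,
                getD_set_ne heap (((pos - 1) / 2 - 1) / 2) pos _ (by omega)]
              exact le_trans (ha ((pos - 1) / 2) hpp1 (by omega) (by omega)) hedge
      · next hge =>
        intro i h1 h2
        simp only [List.length_set] at h2
        by_cases hipos : i = pos
        · rw [hipos, getD_set_self heap pos _ hpos,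
            getD_set_ne heap ((pos - 1) / 2) pos _ (by omega)]
          omega
        · by_cases hpar : (i - 1) / 2 = pos
          · rw [getD_set_ne heap i pos _ hipos, hpar, getD_set_self heap pos _ hpos]
            exact (hb i h1 h2 hpar hipos).1
          · rw [getD_set_ne heap i pos _ hipos, getD_set_ne heap ((i - 1) / 2) pos _ hpar]
            exact ha i h1 h2 hipos
    · next h0 =>
      intro i h1 h2
      simp only [List.length_set] at h2
      have hp0 : pos = 0 := by omega
      by_cases hpar : (i - 1) / 2 = pos
      · rw [getD_set_ne heap i pos _ (by omega), hpar, getD_set_self heap pos _ hpos]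
        exact (hb i h1 h2 hpar (by omega)).1
      · rw [getD_set_ne heap i pos _ (by omega), getD_set_ne heap ((i - 1) / 2) pos _ hpar]
        exact ha i h1 h2 (by omega)

-- _siftup (move the hole down to a leaf, then percolate up): the same three facts
theorem suGo_length (heap : List Int) (s pos : Nat) (ni : Int) :
    (suGo heap s pos ni).length = heap.length := by
  fun_induction suGo <;> simp_all [siftdown, sdGo_length]

theorem suGo_perm : ∀ (n pos : Nat) (heap : List Int) (s : Nat) (ni : Int),
    heap.length - pos = n → pos < heap.length →
    (suGo heap s pos ni).Perm (heap.set pos ni) := by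
  intro n
  induction n using Nat.strong_induction_on with
  | _ n ih =>
    intro pos heap s ni hn hpos
    rw [suGo]
    show (if _h : 2 * pos + 1 < heap.length then
        suGo (heap.set pos (heap.getD (if 2 * pos + 1 + 1 < heap.length ∧
            ¬ (heap.getD (2 * pos + 1) 0 < heap.getD (2 * pos + 1 + 1) 0) then 2 * pos + 1 + 1
          else 2 * pos + 1) 0)) s (if 2 * pos + 1 + 1 < heap.length ∧
            ¬ (heap.getD (2 * pos + 1) 0 < heap.getD (2 * pos + 1 + 1) 0) then 2 * pos + 1 + 1
          else 2 * pos + 1) ni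
      else siftdown (heap.set pos ni) s pos).Perm (heap.set pos ni)
    split
    · next h =>
      set c := (if 2 * pos + 1 + 1 < heap.length ∧
          ¬ (heap.getD (2 * pos + 1) 0 < heap.getD (2 * pos + 1 + 1) 0) then 2 * pos + 1 + 1
        else 2 * pos + 1) with hc
      have hcb : pos < c ∧ c < heap.length := by rw [hc]; split <;> omega
      have h1 : (suGo (heap.set pos (heap.getD c 0)) s c ni).Perm
          ((heap.set pos (heap.getD c 0)).set c ni) := by
        apply ih ((heap.set pos (heap.getD c 0)).length - c) (by simp; omega) c _ s ni rfl
        simp; omega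
      exact h1.trans (perm_double_set heap pos c ni (by omega) hpos (by omega))
    · next h =>
      unfold siftdown
      rw [getD_set_self heap pos _ hpos]
      have := sdGo_perm pos (heap.set pos ni) s ni (by simpa using hpos)
      simpa [List.set_set] using this

theorem suGo_isHeap : ∀ (n pos : Nat) (heap : List Int) (ni : Int),
    heap.length - pos = n → pos < heap.length →
    (∀ i, 1 ≤ i → i < heap.length → i ≠ pos → (i - 1) / 2 ≠ pos →
      heap.getD ((i - 1) / 2) 0 ≤ heap.getD i 0) →
    (∀ j, 1 ≤ j → j < heap.length → (j - 1) / 2 = pos → j ≠ pos → 1 ≤ pos →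
      heap.getD ((pos - 1) / 2) 0 ≤ heap.getD j 0) →
    IsHeap (suGo heap 0 pos ni) := by
  intro n
  induction n using Nat.strong_induction_on with
  | _ n ih =>
    intro pos heap ni hn hpos ha hb
    rw [suGo]
    show IsHeap (if _h : 2 * pos + 1 < heap.length then
        suGo (heap.set pos (heap.getD (if 2 * pos + 1 + 1 < heap.length ∧
            ¬ (heap.getD (2 * pos + 1) 0 < heap.getD (2 * pos + 1 + 1) 0) then 2 * pos + 1 + 1
          else 2 * pos + 1) 0)) 0 (if 2 * pos + 1 + 1 < heap.length ∧
            ¬ (heap.getD (2 * pos + 1) 0 < heap.getD (2 * pos + 1 + 1) 0) then 2 * pos + 1 + 1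
          else 2 * pos + 1) ni
      else siftdown (heap.set pos ni) 0 pos)
    split
    · next h =>
      set c := (if 2 * pos + 1 + 1 < heap.length ∧
          ¬ (heap.getD (2 * pos + 1) 0 < heap.getD (2 * pos + 1 + 1) 0) then 2 * pos + 1 + 1
        else 2 * pos + 1) with hc
      have hcb : pos < c ∧ c < heap.length ∧ (c = 2 * pos + 1 ∨ c = 2 * pos + 2) := by
        rw [hc]; split <;> omega
      have hparc : (c - 1) / 2 = pos := by omega
      have hmin : ∀ j, j < heap.length → (j - 1) / 2 = pos → 1 ≤ j → j ≠ c →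
          heap.getD c 0 ≤ heap.getD j 0 := by
        intro j hjlen hjpar hj1 hjc
        have hj2 : j = 2 * pos + 1 ∨ j = 2 * pos + 2 := by omega
        rw [hc]
        split
        · next hcond =>
          have hcr : c = 2 * pos + 1 + 1 := by rw [hc, if_pos hcond]
          rw [hcr] at hjc
          have hj3 : j = 2 * pos + 1 := by omega
          rw [hj3]
          exact not_lt.mp hcond.2
        · next hcond =>
          have hcl : c = 2 * pos + 1 := by rw [hc, if_neg hcond]
          rw [hcl] at hjc
          have hj3 : j = 2 * pos + 2 := by omega
          rw [hj3]
          rcases Decidable.not_and_iff_or_not.mp hcond with h' | h'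
          · omega
          · have hlr : heap.getD (2 * pos + 1) 0 < heap.getD (2 * pos + 1 + 1) 0 :=
              not_not.mp h'
            have e : (2 : Nat) * pos + 2 = 2 * pos + 1 + 1 := by omega
            rw [e]; exact le_of_lt hlr
      apply ih ((heap.set pos (heap.getD c 0)).length - c) (by simp; omega)
        c _ ni rfl (by simp; omega)
      · -- the parent-edge hypothesis for the shifted state
        intro i h1 h2 hic hipc
        simp only [List.length_set] at h2
        by_cases hipos : i = pos
        · rw [hipos, getD_set_self heap pos _ hpos,
            getD_set_ne heap ((pos - 1) / 2) pos _ (by omega)]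
          exact hb c (by omega) (by omega) hparc (by omega) (by omega)
        · by_cases hpar : (i - 1) / 2 = pos
          · rw [getD_set_ne heap i pos _ hipos, hpar, getD_set_self heap pos _ hpos]
            exact hmin i h2 hpar h1 hic
          · rw [getD_set_ne heap i pos _ hipos, getD_set_ne heap ((i - 1) / 2) pos _ hpar]
            exact ha i h1 h2 hipos hpar
      · -- the child hypothesis for the shifted state
        intro j h1 h2 hjpar hjc _hc1
        simp only [List.length_set] at h2
        have hjpos : j ≠ pos := by omega
        rw [hparc, getD_set_self heap pos _ hpos, getD_set_ne heap j pos _ hjpos]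
        have := ha j h1 h2 hjpos (by omega)
        rwa [hjpar] at this
    · next h =>
      unfold siftdown
      rw [getD_set_self heap pos _ hpos]
      apply sdGo_isHeap pos _ ni (by simpa using hpos)
      · intro i h1 h2 hipos
        simp only [List.length_set] at h2
        have hpar : (i - 1) / 2 ≠ pos := by omega
        rw [getD_set_ne heap i pos _ hipos, getD_set_ne heap ((i - 1) / 2) pos _ hpar]
        exact ha i h1 h2 hipos hpar
      · intro j h1 h2 hjpar hjpos
        simp only [List.length_set] at h2
        omega

-- the root of a heap is a minimum
theorem isHeap_min (l : List Int) (hl : IsHeap l) :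
    ∀ i, i < l.length → l.getD 0 0 ≤ l.getD i 0 := by
  intro i
  induction i using Nat.strong_induction_on with
  | _ i ih =>
    intro hi
    rcases Nat.eq_zero_or_pos i with h0 | h1
    · rw [h0]
    · exact le_trans (ih ((i - 1) / 2) (by omega) (by omega)) (hl i h1 hi)

theorem heap_head_le (l : List Int) (hl : IsHeap l) : ∀ x ∈ l, l.getD 0 0 ≤ x := by
  intro x hx
  obtain ⟨i, hi, rfl⟩ := List.mem_iff_getElem.mp hx
  have := isHeap_min l hl i hi
  rwa [List.getD_eq_getElem _ _ hi] at this

theorem heappop_spec (l : List Int) (hl : IsHeap l) (hne : l ≠ []) :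
    (heappop l).1 = l.getD 0 0 ∧ IsHeap (heappop l).2 ∧
    (l.getD 0 0 :: (heappop l).2).Perm l ∧ (heappop l).2.length + 1 = l.length := by
  have hpop := PySem.List.pop?_last l.dropLast (l.getLast hne)
  rw [List.dropLast_append_getLast hne] at hpop
  unfold heappop
  rw [hpop]
  dsimp only
  by_cases hrest : l.dropLast = []
  · have hlen1 : l.length = 1 := by
      have hdl : l.dropLast.length = l.length - 1 := List.length_dropLast
      rw [hrest] at hdl
      simp at hdl
      have hp : 0 < l.length := List.length_pos_iff.mpr hne
      omega
    obtain ⟨x, rfl⟩ := List.length_eq_one_iff.mp hlen1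
    simp [IsHeap]
  · have hlen2 : 2 ≤ l.length := by
      have hdl : l.dropLast.length = l.length - 1 := List.length_dropLast
      have hp1 : 0 < l.length := List.length_pos_iff.mpr hne
      have hp2 : 0 < l.dropLast.length := List.length_pos_iff.mpr hrest
      omega
    rw [if_neg hrest]
    dsimp only
    have hr0 : 0 < l.dropLast.length := by rw [List.length_dropLast]; omega
    have e0 : l.dropLast.getD 0 0 = l.getD 0 0 := getD_dropLast l 0 (by omega)
    set h2 := l.dropLast.set 0 (l.getLast hne) with hh2
    have hlen2' : h2.length = l.length - 1 := by rw [hh2, List.length_set, List.length_dropLast]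
    have hheap : IsHeap (siftup h2 0) := by
      unfold siftup
      apply suGo_isHeap h2.length 0 h2 _ rfl (by omega)
      · intro i h1 hi hi0 hpar
        rw [hh2, getD_set_ne _ i 0 _ hi0, getD_set_ne _ ((i - 1) / 2) 0 _ hpar]
        rw [hh2, List.length_set] at hi
        rw [getD_dropLast l i (by rw [List.length_dropLast] at hi; omega),
          getD_dropLast l ((i - 1) / 2) (by rw [List.length_dropLast] at hi; omega)]
        exact hl i h1 (by rw [List.length_dropLast] at hi; omega)
      · intro j _ _ _ _ hj0
        omega
    have hperm : (siftup h2 0).Perm h2 := by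
      unfold siftup
      have := suGo_perm h2.length 0 h2 0 (h2.getD 0 0) rfl (by omega)
      rwa [set_getD_self h2 0 (by omega)] at this
    refine ⟨by rw [e0], hheap, ?_, ?_⟩
    · -- (l[0] :: result).Perm l
      have p1 : (l.getD 0 0 :: siftup h2 0).Perm (l.getD 0 0 :: h2) := List.Perm.cons _ hperm
      have p2 : (l.getD 0 0 :: h2).Perm (l.getLast hne :: l.dropLast) := by
        rw [hh2, ← e0]
        exact perm_getD_cons_set l.dropLast 0 (l.getLast hne) hr0
      have p3 : (l.getLast hne :: l.dropLast).Perm l := by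
        have := List.perm_append_singleton (l.getLast hne) l.dropLast
        rw [List.dropLast_append_getLast hne] at this
        exact this.symm
      exact (p1.trans p2).trans p3
    · have := suGo_length h2 0 0 (h2.getD 0 0)
      unfold siftup
      omega

theorem heappush_spec (l : List Int) (v : Int) (hl : IsHeap l) :
    IsHeap (heappush l v) ∧ (heappush l v).Perm (v :: l) := by
  unfold heappush siftdown
  show IsHeap (sdGo (l ++ [v]) 0 ((l ++ [v]).length - 1) ((l ++ [v]).getD ((l ++ [v]).length - 1) 0)) ∧
    (sdGo (l ++ [v]) 0 ((l ++ [v]).length - 1) ((l ++ [v]).getD ((l ++ [v]).length - 1) 0)).Perm (v :: l)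
  have hlen : (l ++ [v]).length - 1 = l.length := by simp
  rw [hlen, getD_append_self l v]
  constructor
  · apply sdGo_isHeap l.length (l ++ [v]) v (by simp)
    · intro i h1 hi hipos
      simp only [List.length_append, List.length_singleton] at hi
      have hilt : i < l.length := by omega
      rw [getD_append_lt l v i hilt, getD_append_lt l v ((i - 1) / 2) (by omega)]
      exact hl i h1 hilt
    · intro j h1 hj hpar hjne
      simp only [List.length_append, List.length_singleton] at hj
      omega
  · have := sdGo_perm l.length (l ++ [v]) 0 v (by simp)
    have e : (l ++ [v]).set l.length v = l ++ [v] := by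
      have e0 := set_getD_self (l ++ [v]) l.length (by simp)
      rwa [getD_append_self l v] at e0
    rw [e] at this
    exact this.trans (List.perm_append_singleton v l)

-- the two loops agree on permuted states as long as A's state is a heap
theorem loop_eq (K : Int) : ∀ (fuel : Nat) (ha : List Int) (xb : List Int) (cnt : Int),
    ha.Perm xb → IsHeap ha → aLoop fuel ha K cnt = bLoop fuel xb K cnt := by
  intro fuel
  induction fuel with
  | zero => intro ha xb cnt _ _; rfl
  | succ fuel ih =>
    intro ha xb cnt hperm hheap
    by_cases hnil : ha = []
    · have hxb : xb = [] := by
        subst hnil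
        exact hperm.symm.eq_nil
      subst hnil; subst hxb
      rfl
    · obtain ⟨h0, t, rfl⟩ := List.exists_cons_of_ne_nil hnil
      have hxbne : xb ≠ [] := by
        intro hx
        rw [hx] at hperm
        exact hnil (hperm.eq_nil)
      obtain ⟨m, hm⟩ := Option.ne_none_iff_exists'.mp
        (fun hm0 => hxbne ((PySem.List.min?_eq_none_iff xb (fun y : Int => y)).mp hm0))
      have hmmem : m ∈ xb := PySem.List.min?_mem hm
      have hmmin : ∀ y ∈ xb, m ≤ y := by
        intro y hy
        simpa using PySem.List.min?_isMin hm y hy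
      have hg0 : (h0 :: t).getD 0 0 = h0 := rfl
      have hm0 : h0 = m := by
        apply le_antisymm
        · have := heap_head_le (h0 :: t) hheap m (hperm.symm.mem_iff.mp hmmem)
          simpa using this
        · exact hmmin h0 (hperm.mem_iff.mp (by simp))
      subst hm0
      have hlen : (h0 :: t).length = xb.length := hperm.length_eq
      show aLoop (fuel + 1) (h0 :: t) K cnt = bLoop (fuel + 1) xb K cnt
      rw [aLoop, bLoop, hm]
      rw [PySem.List.pyGet?_zero_cons]
      dsimp only
      by_cases hK : h0 ≤ K
      · rw [if_pos hK, if_pos hK]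
        by_cases hl1 : (h0 :: t).length = 1
        · rw [if_pos hl1, if_pos (by omega)]
        · rw [if_neg hl1, if_neg (by omega)]
          -- first extraction: heappop returns the minimum, scan-and-remove removes it
          have hpop1 := heappop_spec (h0 :: t) hheap (by simp)
          have ha1 := hpop1.2.1
          have hp1perm := hpop1.2.2.1
          rw [hg0] at hp1perm
          have hxs1 : (PySem.List.remove? xb h0).getD [] = xb.erase h0 := by
            rw [PySem.List.remove?_eq_some_erase xb h0 hmmem]
            rfl
          have hperm1 : (heappop (h0 :: t)).2.Perm (xb.erase h0) := by
            apply List.Perm.cons_inv (a := h0)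
            exact hp1perm.trans (hperm.trans (List.perm_cons_erase hmmem))
          -- second extraction
          have hlen1 : (heappop (h0 :: t)).2.length + 1 = (h0 :: t).length := hpop1.2.2.2
          have hne1 : (heappop (h0 :: t)).2 ≠ [] := by
            apply List.ne_nil_of_length_pos
            simp only [List.length_cons] at hlen1 hl1 hlen
            omega
          have hbnn : PySem.List.min? (xb.erase h0) (fun y : Int => y) ≠ none := by
            intro hb0
            have hee := (PySem.List.min?_eq_none_iff (xb.erase h0) (fun y : Int => y)).mp hb0
            rw [hee] at hperm1
            exact hne1 hperm1.eq_nil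
          obtain ⟨b, hb⟩ := Option.ne_none_iff_exists'.mp hbnn
          have hbmem : b ∈ xb.erase h0 := PySem.List.min?_mem hb
          have hbmin : ∀ y ∈ xb.erase h0, b ≤ y := by
            intro y hy
            simpa using PySem.List.min?_isMin hb y hy
          have hb0 : (heappop (h0 :: t)).2.getD 0 0 = b := by
            apply le_antisymm
            · exact heap_head_le _ ha1 b (hperm1.symm.mem_iff.mp hbmem)
            · refine hbmin _ (hperm1.mem_iff.mp ?_)
              have hp : 0 < (heappop (h0 :: t)).2.length := List.length_pos_iff.mpr hne1
              rw [List.getD_eq_getElem _ _ hp]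
              exact List.getElem_mem hp
          have hpop2 := heappop_spec (heappop (h0 :: t)).2 ha1 hne1
          have ha2 := hpop2.2.1
          have hp2perm := hpop2.2.2.1
          rw [hb0] at hp2perm
          have hperm2 : (heappop (heappop (h0 :: t)).2).2.Perm ((xb.erase h0).erase b) := by
            apply List.Perm.cons_inv (a := b)
            exact hp2perm.trans (hperm1.trans (List.perm_cons_erase hbmem))
          -- push the combined value / append the combined value
          have hpush := heappush_spec (heappop (heappop (h0 :: t)).2).2
            ((heappop (h0 :: t)).1 + 2 * (heappop (heappop (h0 :: t)).2).1) ha2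
          simp only [Option.getD_some]
          rw [hxs1, hb]
          simp only [Option.getD_some]
          rw [PySem.List.remove?_eq_some_erase (xb.erase h0) b hbmem]
          simp only [Option.getD_some]
          have e1 : (heappop (h0 :: t)).1 = h0 := by rw [hpop1.1, hg0]
          have e2 : (heappop (heappop (h0 :: t)).2).1 = b := by rw [hpop2.1, hb0]
          rw [e1, e2] at hpush ⊢
          apply ih
          · refine hpush.2.trans ?_
            refine (List.Perm.cons _ hperm2).trans ?_
            exact (List.perm_append_singleton _ _).symm
          · exact hpush.1
      · rw [if_neg hK, if_neg hK]

-- the initial sorted list is a heap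
theorem sorted_isHeap (l : List Int) : IsHeap (PySem.List.sorted l (fun x => x) false) := by
  intro i h1 hi
  rw [List.getD_eq_getElem _ _ (by omega), List.getD_eq_getElem _ _ hi]
  exact PySem.List.key_sorted_getElem_mono (xs := l) (key := fun x => x)
    (p := (i - 1) / 2) (q := i) (by omega) hi

-- ===== VERDICT (by name: the statement is the Claim_ definition above) =====
theorem solution_spec : Claim_equal_solution := by
  intro scoville K _ _
  unfold Spec_solution solution solution_alt
  have hperm := PySem.List.sorted_perm (xs := scoville) (key := fun x : Int => x) (rev := false)
  have hlen : (PySem.List.sorted scoville (fun x => x) false).length = scoville.length :=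
    hperm.length_eq
  rw [hlen]
  exact loop_eq K scoville.length _ scoville 0 hperm (sorted_isHeap scoville)
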